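/-
  THE CODEBOOK PREDICATES AT WORK (Vorbis/Codebook.lean): each structure used the way a function proof will use it.
      (a) check sites of the decode path: the inline DECODE_RAW / DECODE expansion, codebook_decode, codebook_decode_scalar_raw
      (b) carrying `CodebookOK` (and the header clauses) over a store, over an allocator call, over the struct copy `*f = p`,
          over a change of the block predicate
      (c) the binary search
      (d) the codebook loop of start_decoder: L, CNT, CNT′, VAL, ZV, ZF, the loop step
      (e) header and comments
  Throughout: `Blk` the allocated blocks (`hok : BlkOK Blk` its laws, `hL : BlkLive Blk Live` "allocated blocks are live"),
  `hc : Covers Live mem` the shadow cover. A check site is ALWAYS: `have s := h.site_… hL … ha`, then `s.acc hc`.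
-/
import Vorbis.Codebook
namespace Vorbis.CodebookTest
open X86 X86.User Asan Vorbis

/-! ### (a) Check sites of the decode path -/

/-- A book index below `codebook_count`: `CodebookOK`, and the struct lies inside the (allocated) codebooks block — what
`f->codebooks + b` gives a decode-time function. -/
example (Blk : Block → Prop) (mem : Mem) (f b : Nat) (h0 : CodebooksOK Blk mem f)
    (hall : BooksOK Blk mem f (stb_vorbis.codebook_count mem f).toNat) (hb : (b : Int) < stb_vorbis.codebook_count mem f) :
    CodebookOK Blk mem (stb_vorbis.codebooks_at mem f b) ∧
      Blk (codebooksBlock mem f) ∧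
      (codebooksBlock mem f).contains (stb_vorbis.codebooks_at mem f b) Off.sizeof.Codebook :=
  ⟨(hall.book h0 b hb).1, h0.F2, (hall.book h0 b hb).2⟩

/-- **The check site of `CodebooksOK` in three lines**: `__asan_load1_noabort(&c->sparse)` for `c = f->codebooks + b`: a field of an
element of the codebooks block, with the address as the stepper leaves it (`codebooks + b * 2120 + 27`). -/
example (Blk : Block → Prop) (Live : Nat → Prop) (mem : Mem) (f b : Nat) (hc : Covers Live mem) (hL : BlkLive Blk Live)
    (h0 : CodebooksOK Blk mem f) (hb : (b : Int) < stb_vorbis.codebook_count mem f) :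
    AccessibleSmall mem (mem.u64 (f + 168) + b * 2120 + 27) 1 := by
  have s := h0.site_cb_field hL b hb Off.Codebook.sparse 1 (by simp only [voff]; omega) (by omega)
    (a := mem.u64 (f + 168) + b * 2120 + 27) (by simp only [vacc, voff]; omega)
  exact s.acc hc

/-- DECODE_RAW, the table load: `__asan_load2_noabort(c + (acc & 1023) * 2 + 48)` with `rdi` holding that address; the struct at
`c` lies inside the allocated block `B`. -/
example (Blk : Block → Prop) (Live : Nat → Prop) (u : State) (c acc : Nat) (B : Block) (hc : Covers Live u.mem)
    (hL : BlkLive Blk Live) (hB : Blk B) (hin : B.contains c Off.sizeof.Codebook)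
    (hr : u.reg .rdi = addr (c + (acc &&& 1023) * 2 + 48)) :
    AccessibleSmall u.mem (u.reg .rdi).toNat 2 := by
  rw [hr]
  have s := Codebook.site_fast_huffman hL hB hin (acc &&& 1023) (and_1023_lt acc)
    (a := c + (acc &&& 1023) * 2 + 48) (by simp only [voff]; omega)
  exact s.acc_addr hc

/-- Any field of the struct at `c` (`c->dimensions`, the `int` at offset 0, in codebook_decode_start). -/
example (Blk : Block → Prop) (Live : Nat → Prop) (mem : Mem) (c : Nat) (B : Block) (hc : Covers Live mem)
    (hL : BlkLive Blk Live) (hB : Blk B) (hin : B.contains c Off.sizeof.Codebook) : AccessibleSmall mem c 4 := by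
  have s := Codebook.site_field hL hB hin Off.Codebook.dimensions 4 (by simp only [voff]; omega) (by omega)
    (a := c) (by simp only [voff]; omega)
  exact s.acc hc

/-- **The check site of `CodebookOK` in three lines.** DECODE_RAW, the fast path: `var = c->fast_huffman[k] ≥ 0` ⇒ the check of
`c->codeword_lengths[var]` passes (K5 + K3). The register holds the pointer plus the sign-extended value; under `0 ≤ var` that
is `codeword_lengths + var.toNat`. -/
example (Blk : Block → Prop) (Live : Nat → Prop) (mem : Mem) (c k : Nat) (hc : Covers Live mem) (hL : BlkLive Blk Live)
    (h : CodebookOK Blk mem c) (hk : k < 1024) (hv : 0 ≤ Codebook.fast_huffman mem c k) :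
    AccessibleSmall mem (mem.u64 (c + 8) + (mem.i16 (c + 48 + 2 * k)).toNat) 1 := by
  have s := h.site_lengths_of_fast hL k hk hv (a := mem.u64 (c + 8) + (mem.i16 (c + 48 + 2 * k)).toNat)
    (by simp only [vacc, voff])
  exact s.acc hc

/-- The result of the fast path is a DECODE_RAW result, hence (dense book) a DECODE result: an index of `classdata`. -/
example (Blk : Block → Prop) (mem : Mem) (c k : Nat) (h : CodebookOK Blk mem c) (hk : k < 1024)
    (hs : Codebook.sparse mem c = 0) : DecodeResult mem c (Codebook.fast_huffman mem c k) :=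
  h.decode_dense hs (h.decodeRaw_fast k hk)

/-- **DECODE's translation with `var = −1`** (a sparse book; all five expansions get here): the machine address
`sorted_values + 4 * sext(var)` is the word before the pointer, its check passes, and the word read is −1. -/
example (Blk : Block → Prop) (Live : Nat → Prop) (mem : Mem) (c : Nat) (hc : Covers Live mem) (hL : BlkLive Blk Live)
    (hok : BlkOK Blk) (h : CodebookOK Blk mem c) (hs : Codebook.sparse mem c ≠ 0) :
    addr (Codebook.sorted_values mem c) + word (-1) * 4 = addr (Codebook.sorted_values mem c - 4) ∧
      AccessibleSmall mem (Codebook.sorted_values mem c - 4) 4 ∧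
      mem.i32 (Codebook.sorted_values mem c - 4) = -1 := by
  have hse := h.se_pos_of_sparse hs
  have hge := h.sorted_values_ge hok hse
  refine ⟨?_, ?_, ?_⟩
  · exact addr_add_word_m1_mul4 _ (by omega)
  · exact (h.site_sorted_values_m1 hL hse rfl).acc hc
  · exact h.K4.sentinel hse

/-- DECODE's translation for ANY DECODE_RAW result `v` of a sparse book: the check passes and the word read is a DECODE result. -/
example (Blk : Block → Prop) (Live : Nat → Prop) (mem : Mem) (c : Nat) (v : Int) (hc : Covers Live mem)
    (hL : BlkLive Blk Live) (hok : BlkOK Blk) (h : CodebookOK Blk mem c) (hs : Codebook.sparse mem c ≠ 0)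
    (hv : DecodeRawResult mem c v) :
    AccessibleSmall mem (Codebook.sorted_values mem c - 4 + 4 * (v + 1).toNat) 4 ∧
      DecodeResult mem c (Codebook.sortedValue mem c v) :=
  ⟨(h.site_sortedValue hL hs hv rfl).acc hc, h.decode_sparse hok hs hv⟩

/-- codebook_decode: `c->multiplicands[z * dimensions + i]` with `z·dimensions` in a register as the number `zd`. -/
example (Blk : Block → Prop) (Live : Nat → Prop) (mem : Mem) (c z i zd : Nat) (hc : Covers Live mem) (hL : BlkLive Blk Live)
    (h : CodebookOK Blk mem c) (ht : Codebook.lookup_type mem c = 2) (hz : (z : Int) < Codebook.N mem c)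
    (hi : (i : Int) < Codebook.dimensions mem c) (hzd : zd = z * (Codebook.dimensions mem c).toNat) :
    AccessibleSmall mem (mem.u64 (c + 32) + (zd + i) * 4) 4 := by
  have s := h.site_multiplicands hL ht z i hz hi (a := mem.u64 (c + 32) + (zd + i) * 4)
    (by simp only [vacc, voff] at hzd ⊢; omega)
  exact s.acc hc

/-- The same index does not wrap in 32 bits (`imul r32`, `movsxd`, `shl 2`). -/
example (Blk : Block → Prop) (mem : Mem) (c z i : Nat) (h : CodebookOK Blk mem c) (ht : Codebook.lookup_type mem c = 2)
    (hz : (z : Int) < Codebook.N mem c) (hi : (i : Int) < Codebook.dimensions mem c) :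
    4 * (z * (Codebook.dimensions mem c).toNat + i) + 4 ≤ 0x80000000 := by
  have := h.multiplicands_index_lt ht z i hz hi
  omega

/-- codebook_decode_scalar_raw's path choice from POINTER tests: `sorted_codewords ≠ NULL` gives `se ≥ 1`, so the binary search may
start (`BS.init`); `codewords = NULL` gives a sparse book. The base of an allocated block is not NULL: `hok`. -/
example (Blk : Block → Prop) (mem : Mem) (c : Nat) (h : CodebookOK Blk mem c) (hok : BlkOK Blk)
    (hp : Codebook.sorted_codewords mem c ≠ 0) (hq : Codebook.codewords mem c = 0) :
    BS 0 (Codebook.sorted_entries mem c).toNat (Codebook.sorted_entries mem c).toNat ∧ Codebook.sparse mem c ≠ 0 := by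
  have hse := (h.sorted_codewords_ne_zero_iff hok).mp hp
  constructor
  · exact BS.init (by omega)
  · intro hs
    exact ((h.codewords_ne_zero_iff hok).mpr hs) hq

/-- The access itself after the check (`L.Has`), from the same `Site`. -/
example (L : Layout) (Blk : Block → Prop) (Live : Nat → Prop) (mem : Mem) (c x : Nat) (hc : Covers Live mem)
    (hL : BlkLive Blk Live) (h : CodebookOK Blk mem c) (hx : (x : Int) < Codebook.sorted_entries mem c)
    (hLay : 0xC00000 ≤ L.hi) : L.Has (addr (Codebook.sorted_values_at mem c x)) 4 :=
  (h.site_sorted_values hL x hx rfl).has hc hLay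

/-- The clauses are applied like functions: `h.K5 k hk`, `h.K4c x hx`. -/
example (Blk : Block → Prop) (mem : Mem) (c k : Nat) (h : CodebookOK Blk mem c) (hk : k < 1024) :
    Codebook.fast_huffman mem c k < 32767 := by
  cases h.K5 k hk with
  | inl h1 => omega
  | inr h2 => exact h2.2.2

/-! ### (b) Frame -/

/-- **A store to `f->valid_bits`** (`mov [rbx + 1768], eax`; every DECODE expansion does it) keeps `CodebookOK c`: the decoder object is
disjoint from the struct at `c` (which lies inside the allocated block `B`) and from the `sorted_values` block. -/
example (Blk : Block → Prop) (mem : Mem) (f c v : Nat) (B : Block) (hok : BlkOK Blk) (h : CodebookOK Blk mem c)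
    (hB : Blk B) (hin : B.contains c Off.sizeof.Codebook) (hf : f + 1808 ≤ 0xC00000)
    (hd1 : (Codebook.block c).disjoint (Block.mk f 1808))
    (hd2 : (Codebook.svBlock mem c).disjoint (Block.mk f 1808)) :
    CodebookOK Blk (mem.writeLE (addr (f + 1768)) 4 v) c := by
  apply h.frame_writeLE hok hB hin (Block.mk f 1808) (f + 1768) 4 v
  · simp only [vblock]
    omega
  · simp only []
    omega
  · exact hd1
  · intro _
    exact hd2

/-- The same store when the decoder object is an allocated block too (`OB1`): disjointness comes from `BlkOK`, nothing is assumed. -/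
example (Blk : Block → Prop) (mem : Mem) (f v : Nat) (b : Nat) (hok : BlkOK Blk) (hob : OB1 Blk f)
    (h0 : CodebooksOK Blk mem f) (hb : (b : Int) < stb_vorbis.codebook_count mem f)
    (h : CodebookOK Blk mem (stb_vorbis.codebooks_at mem f b))
    (hne : stb_vorbis.codebooks mem f ≠ f)
    (hne2 : 1 ≤ Codebook.sorted_entries mem (stb_vorbis.codebooks_at mem f b) →
      Codebook.sorted_values mem (stb_vorbis.codebooks_at mem f b) - 4 ≠ f) :
    CodebookOK Blk (mem.writeLE (addr (f + 1768)) 4 v) (stb_vorbis.codebooks_at mem f b) := by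
  have hin : (objBlock f).contains (f + 1768) 4 := by
    simp only [vblock, voff]
    omega
  apply h.frame
  · apply (h0.cb_kept _ b hb)
    exact hok.kept_store h0.F2 hob.blk (fun e => hne (congrArg Block.base e)) mem v hin
  · intro hse
    exact hok.kept_store (h.K4.sv hse) hob.blk (fun e => hne2 hse (congrArg Block.base e)) mem v hin

/-- The general form: any `mem'` in which the two blocks are kept. -/
example (Blk : Block → Prop) (mem mem' : Mem) (c : Nat) (h : CodebookOK Blk mem c)
    (hs : (Codebook.block c).Kept mem mem') (hv : (Codebook.svBlock mem c).Kept mem mem') : CodebookOK Blk mem' c :=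
  h.frame hs (fun _ => hv)

/-- **`transfer` of `CodebookOK`** (the codebook does not move): every allocated block is kept (`AllKept`: pushes, spills, a callee
that writes no allocated block) and the block predicate grew (`setup_malloc` returned a new block). -/
example (Blk Blk' : Block → Prop) (mem mem' : Mem) (c : Nat) (B : Block) (h : CodebookOK Blk mem c) (hB : Blk B)
    (hin : B.contains c Off.sizeof.Codebook) (hall : AllKept Blk mem mem') (hsub : ∀ X, Blk X → Blk' X) :
    CodebookOK Blk' mem' c := by
  simp only [vblock] at hin
  apply h.transfer
  · exact (hall B hB).mono hin.1 hin.2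
  · intro hse
    exact hall _ (h.K4.sv hse)
  · intro X _ hX
    exact hsub X hX

/-- The same as an instance of `Group.Stable` (what Vorbis/State.lean uses). -/
example (Blk Blk' : Block → Prop) (mem mem' : Mem) (c : Nat) (B : Block) (h : CodebookOK Blk mem c) (hB : Blk B)
    (hin : B.contains c Off.sizeof.Codebook) (hall : AllKept Blk mem mem') (hsub : ∀ X, Blk X → Blk' X) :
    CodebookOK Blk' mem' c :=
  CodebookOK.stable Blk Blk' mem mem' c hall hsub ⟨B, hB, hin⟩ h

/-- A callee's footprint (`Mem.SameExcept`) off the struct keeps a partial set of clauses (a start_decoder segment between two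
calls holds K1, K2 only). -/
example (mem mem' : Mem) (c lo hi : Nat) (h1 : Codebook.K1 mem c) (h2 : Codebook.K2 mem c)
    (hs : Mem.SameExcept [⟨lo, hi⟩] mem mem') (hd : hi ≤ c) (hcb : c + 2120 ≤ 0xC00000) :
    Codebook.K1 mem' c ∧ Codebook.K2 mem' c := by
  have hkept : (Codebook.block c).Kept mem mem' := by
    apply Block.Kept.of_sameExcept hs
    · intro w hw
      have e : w = ⟨lo, hi⟩ := List.mem_singleton.mp hw
      subst e
      exact Or.inr hd
    · simp only [voff]
      omega
  have e := Codebook.SameFields.of_kept hkept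
  exact ⟨h1.frame e, h2.frame e⟩

/-- **`HeaderOK` over an allocator call** (`ObjSame`: everything of `*f` except `setup_offset` / `temp_offset`). -/
example (mem mem' : Mem) (f : Nat) (h : HeaderOK mem f) (hs : ObjSame f mem mem') : HeaderOK mem' f :=
  h.frame hs

/-- **`HeaderOK` over the struct copy `*f = p`** (`memcpy(f, &p, 1808)`). -/
example (mem mem' : Mem) (p f : Nat) (h : HeaderOK mem p) (hcp : Copied mem p mem' f 1808) : HeaderOK mem' f :=
  h.transfer (ObjEq.of_copied hcp (by decide))

/-- `HeaderOK` over a store below the decoder object (a spill of start_decoder): `ObjSame.of_writeLE`. -/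
example (mem : Mem) (f : Nat) (sp : Word) (v : Nat) (h : HeaderOK mem f) (hf : f + 1808 ≤ 0xC00000)
    (hsp : sp.toNat + 8 ≤ f) : HeaderOK (mem.writeLE sp 8 v) f := by
  apply h.frame
  apply ObjSame.of_writeLE mem f sp 8 v
  · omega
  · simp only [voff]
    omega
  · exact Or.inl hsp

/-- **`CommentsOK` over an allocator call**: the table of comment pointers is an allocated block (`reads_blk`), every allocated
block is kept. -/
example (Blk : Block → Prop) (mem mem' : Mem) (f : Nat) (h : CommentsOK Blk mem f) (hs : ObjSame f mem mem')
    (hall : AllKept Blk mem mem') : CommentsOK Blk mem' f :=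
  h.frame hs (fun B hR => hall B (h.reads_blk hR))

/-- **`CommentsOK` over the struct copy `*f = p`**: the copy touches no block allocated before (`hkept`), and the block predicate
after `vorbis_alloc` contains the one before. -/
example (Blk Blk' : Block → Prop) (mem mem' : Mem) (p f : Nat) (h : CommentsOK Blk mem p)
    (hcp : Copied mem p mem' f 1808) (hkept : AllKept Blk mem mem') (hsub : ∀ B, Blk B → Blk' B) :
    CommentsOK Blk' mem' f :=
  h.transfer (ObjEq.of_copied hcp (by decide)) (fun B hR => hkept B (h.reads_blk hR)) (fun B _ hb => hsub B hb)

/-- The same from the bundled hypotheses of the transport, `Move` (what Vorbis/State.lean uses: `CommentsOK.good.moves`). -/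
example (Blk Blk' : Block → Prop) (mem mem' : Mem) (p f : Nat) (hm : Move Blk Blk' mem mem' p f)
    (h : CommentsOK Blk mem p) : CommentsOK Blk' mem' f :=
  CommentsOK.good.moves Blk Blk' mem mem' p f hm h

/-- **CB0 / `CodebooksOK` over an allocator call and over the struct copy.** -/
example (Blk Blk' : Block → Prop) (mem mem' mem'' : Mem) (p f : Nat) (h : CB0 Blk mem p) (h0 : CodebooksOK Blk mem p)
    (hs : ObjSame p mem mem') (hcp : Copied mem p mem'' f 1808) (hsub : ∀ B, Blk B → Blk' B) :
    CB0 Blk mem' p ∧ CodebooksOK Blk mem' p ∧ CB0 Blk' mem'' f ∧ CodebooksOK Blk' mem'' f :=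
  ⟨h.frame hs, h0.frame hs,
    h.transfer (ObjEq.of_copied hcp (by decide)) (fun B _ hb => hsub B hb),
    h0.transfer (ObjEq.of_copied hcp (by decide)) (fun B _ hb => hsub B hb)⟩

/-- **The block predicate shrinks**: `setup_temp_free` removes the temp block `T` from the allocated blocks
(`Blk' B ↔ Blk B ∧ B ≠ T`); a finished codebook owns only blocks other than `T`, so `CodebookOK` holds for the smaller predicate.
(The allocation direction is the same lemma with `hsub : ∀ B, Blk B → Blk' B`.) -/
example (Blk Blk' : Block → Prop) (mem : Mem) (c : Nat) (T : Block) (h : CodebookOK Blk mem c)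
    (hfree : ∀ B, Blk B → B ≠ T → Blk' B) (hd : ∀ B, CodebookOK.Owns mem c B → B ≠ T) : CodebookOK Blk' mem c :=
  h.reblk (fun B hO hb => hfree B hb (hd B hO))

/-- The same for all finished books of the loop, and for the header groups. -/
example (Blk Blk' : Block → Prop) (mem : Mem) (f i n : Nat) (h : BooksOK Blk mem f i) (h0 : CB0 Blk mem f)
    (hcm : CommentOK Blk mem f n) (hsub : ∀ B, Blk B → Blk' B) :
    BooksOK Blk' mem f i ∧ CB0 Blk' mem f ∧ CommentOK Blk' mem f n :=
  ⟨h.reblk (fun B _ hb => hsub B hb), h0.reblk (fun B _ hb => hsub B hb), hcm.reblk (fun B _ hb => hsub B hb)⟩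

/-- **`BooksOK` over an allocator call inside the codebook loop** (`setup_malloc` for book `i`): every allocated block is kept,
the block predicate grew, `f->codebooks` is one of the fields an allocator leaves alone. -/
example (Blk Blk' : Block → Prop) (mem mem' : Mem) (f i : Nat) (h : BooksOK Blk mem f i) (h0 : CodebooksOK Blk mem f)
    (hi : (i : Int) ≤ stb_vorbis.codebook_count mem f) (hs : ObjSame f mem mem') (hall : AllKept Blk mem mem')
    (hsub : ∀ B, Blk B → Blk' B) : BooksOK Blk' mem' f i := by
  apply h.carry h0 hi _ hall hsub
  simp only [vacc, voff]
  exact hs.u64 168 (by decide)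

/-! ### (c) The binary search -/

/-- One round of `while (n > 1)`: the probe `m = x + (n >> 1)` is checked against `sorted_codewords`, and whichever branch is
taken the invariant holds again with a smaller `n`. -/
example (Blk : Block → Prop) (Live : Nat → Prop) (mem : Mem) (c x n : Nat) (hc : Covers Live mem) (hL : BlkLive Blk Live)
    (h : CodebookOK Blk mem c) (hbs : BS x n (Codebook.sorted_entries mem c).toNat) (hn : 2 ≤ n) :
    AccessibleSmall mem (mem.u64 (c + 2096) + (x + n / 2) * 4) 4 ∧
      (BS (x + n / 2) (n - n / 2) (Codebook.sorted_entries mem c).toNat ∧ n - n / 2 < n) ∧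
      (BS x (n / 2) (Codebook.sorted_entries mem c).toNat ∧ n / 2 < n) := by
  have hm := hbs.mid_lt hn
  refine ⟨?_, ⟨hbs.right hn, BS.right_lt hn⟩, ⟨hbs.left hn, BS.left_lt hn⟩⟩
  have s := h.site_sorted_codewords hL (x + n / 2) (by omega) (by omega)
    (a := mem.u64 (c + 2096) + (x + n / 2) * 4) (by simp only [vacc, voff]; omega)
  exact s.acc hc

/-- At the exit the result indexes `sorted_values` (dense: the translation) and then `codeword_lengths`. -/
example (Blk : Block → Prop) (Live : Nat → Prop) (mem : Mem) (c x n : Nat) (hL : BlkLive Blk Live)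
    (h : CodebookOK Blk mem c) (hbs : BS x n (Codebook.sorted_entries mem c).toNat) (hs : Codebook.sparse mem c = 0) :
    Site Live (Codebook.codeword_lengths_at mem c (mem.i32 (Codebook.sorted_values_at mem c x)).toNat) 1 := by
  have hx := hbs.exit
  exact h.site_lengths_of_sorted hL hs x (by omega) rfl

/-! ### (d) The codebook loop of start_decoder -/

/-- Loop 3786, a present entry: the byte stored is `get_bits(5) + 1 ∈ [1, 31]` (32 was rejected): L and `total` advance. -/
example (mem mem' : Mem) (p j : Nat) (hL : LenL mem p j) (hs : Mem.EqOn p (p + j) mem mem') (hb : p + j ≤ 0xC00000)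
    (hv : 1 ≤ mem'.u8 (p + j) ∧ mem'.u8 (p + j) ≤ 31) :
    LenL mem' p (j + 1) ∧ usedCount mem' p (j + 1) = usedCount mem p j + 1 := by
  constructor
  · exact hL.store hs (by omega) (Or.inl hv)
  · have hne : mem'.u8 (p + j) ≠ 255 := by omega
    rw [usedCount_succ_used hne, (counts_same hs (by omega)).1]

/-- compute_codewords, sparse: entry `i` is used and `m` entries were used before it ⇒ `add_entry(…, count = m, …)` has
`count < se` (CNT), and its length indexes `available[32]` (K7at). -/
example (mem : Mem) (lengths c i : Nat) (hcnt : CNT mem lengths c) (hk7 : K7at mem lengths (Codebook.entries mem c).toNat)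
    (hi : (i : Int) < Codebook.entries mem c) (hu : mem.u8 (lengths + i) ≠ 255) :
    (usedCount mem lengths i : Int) < Codebook.sorted_entries mem c ∧ 4 * mem.u8 (lengths + i) + 4 ≤ 128 := by
  have hlt : i < (Codebook.entries mem c).toNat := by omega
  constructor
  · have := usedCount_lt (mem := mem) (p := lengths) hlt hu
    unfold CNT at hcnt
    omega
  · exact hk7.index i hlt hu _ (Nat.le_refl _)

/-- compute_sorted_huffman, dense: the store `sorted_codewords[k++]` for an included entry has `k < se` (CNT′). -/
example (mem : Mem) (lengths c i : Nat) (hcnt : CNT' mem lengths c) (hi : (i : Int) < Codebook.entries mem c)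
    (hl : 11 ≤ mem.u8 (lengths + i) ∧ mem.u8 (lengths + i) ≤ 254) :
    (longCount mem lengths i : Int) < Codebook.sorted_entries mem c := by
  have hlt : i < (Codebook.entries mem c).toNat := by omega
  have := longCount_lt (mem := mem) (p := lengths) hlt hl
  unfold CNT' at hcnt
  omega

/-- FIX 7: after `memset(sorted_values, 0, 4·(se + 1))` on the block `B`, and the store of the sentinel at `B`, ZV holds for the table
`B + 4` (the sentinel store does not touch it). -/
example (mem mem' : Mem) (B se : Nat) (entries : Int) (hz : ZeroFill mem B (4 * (se + 1))) (he : 1 ≤ entries)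
    (hs : Mem.EqOn (B + 4) (B + 4 + 4 * se) mem mem') (hb : B + 4 * (se + 1) ≤ 0xC00000) :
    ZV mem' (B + 4) se entries := by
  have hz' : ZeroFill mem (B + 4) (4 * se) := hz.sub _ _ (by omega) (by omega)
  exact (ZV.of_zeroFill hz' he).same hs (by omega)

/-- compute_sorted_huffman's store `c->sorted_values[x] = values[i]` keeps ZV (VAL gives the range of the value). -/
example (mem mem' : Mem) (sv se x values i : Nat) (entries : Nat) (h : ZV mem sv se (entries : Int))
    (hval : VAL mem values se entries) (hi : i < se) (hx : x < se)
    (hs1 : Mem.EqOn sv (sv + 4 * x) mem mem') (hs2 : Mem.EqOn (sv + 4 * x + 4) (sv + 4 * se) mem mem')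
    (hb : sv + 4 * se ≤ 0xC00000) (hst : mem'.i32 (sv + 4 * x) = (mem.u32 (values + 4 * i) : Int)) :
    ZV mem' sv se (entries : Int) := by
  apply h.store hx hs1 hs2 (by omega)
  have := hval i hi
  omega

/-- A book the loop has not reached is fresh: its K4 (`se = 0`) and K6 (`lookup_type = 0`) hold from the zero fill alone. -/
example (Blk : Block → Prop) (mem : Mem) (cbs count i k : Nat) (hzf : ZF mem cbs count i) (h1 : i ≤ k) (h2 : k < count) :
    Codebook.K4 Blk mem (cbs + Off.sizeof.Codebook * k) ∧ Codebook.K6 Blk mem (cbs + Off.sizeof.Codebook * k) := by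
  have hfresh := Codebook.Fresh.of_zeroFill (hzf.book k h1 h2)
  constructor
  · exact Codebook.K4.of_se_zero hfresh.sorted_entries hfresh.sorted_codewords hfresh.sorted_values
  · exact Codebook.K6.of_type_zero hfresh.lookup_type hfresh.multiplicands

/-- The loop step (segment C10): book `i` is finished, the later books are still zero. -/
example (Blk : Block → Prop) (mem : Mem) (f count i : Nat) (h : BooksOK Blk mem f i)
    (hi : CodebookOK Blk mem (stb_vorbis.codebooks_at mem f i)) (hzf : ZF mem (stb_vorbis.codebooks mem f) count i) :
    BooksOK Blk mem f (i + 1) ∧ ZF mem (stb_vorbis.codebooks mem f) count (i + 1) :=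
  ⟨h.succ hi, hzf.next⟩

/-- compute_accelerated_huffman: round `i` of the second loop stores `i` at `fast_huffman[z]`; at the end K5. -/
example (mem mem' : Mem) (c z : Nat) (i : Int) (h : Codebook.K5b mem c i) (h0 : 0 ≤ i)
    (hk : ∀ k, k < 1024 → k ≠ z → Codebook.fast_huffman mem' c k = Codebook.fast_huffman mem c k)
    (hv : Codebook.fast_huffman mem' c z = i) : Codebook.K5b mem' c (i + 1) := by
  have h' : Codebook.K5b mem c (i + 1) := h.mono (by omega)
  exact h'.store hk hv h0 (by omega)

/-- compute_sorted_huffman, sparse: `lengths[values[i]]` (VAL) is a byte of the temp block `lengths` of `entries` bytes. -/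
example (Blk : Block → Prop) (Live : Nat → Prop) (mem : Mem) (values se entries lengths i : Nat) (hc : Covers Live mem)
    (hL : BlkLive Blk Live) (hval : VAL mem values se entries) (hB : Blk ⟨lengths, entries⟩) (hi : i < se) :
    AccessibleSmall mem (lengths + mem.u32 (values + 4 * i)) 1 := by
  have s := hval.site_lengths hL hB i hi rfl
  exact s.acc hc

/-- add_entry's store `c->codewords[count] = code` into the TEMP block of a sparse book under construction (K3t), `count < se = N(c)`. -/
example (Blk : Block → Prop) (Live : Nat → Prop) (mem : Mem) (c m : Nat) (hc : Covers Live mem) (hL : BlkLive Blk Live)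
    (h : Codebook.K3t Blk mem c) (h2 : Codebook.K2 mem c) (hm : (m : Int) < Codebook.N mem c) :
    AccessibleSmall mem (mem.u64 (c + 40) + m * 4) 4 := by
  have s := h.site_codewords hL h2 m hm (a := mem.u64 (c + 40) + m * 4) (by simp only [vacc, voff]; omega)
  exact s.acc hc

/-- Segment C14: a type-2 book whose `multiplicands` were allocated with `4 · lookup_values` bytes, more than K6 asks for. -/
example (Blk : Block → Prop) (mem : Mem) (c : Nat) (h1 : Codebook.K1 mem c) (h2 : Codebook.K2 mem c)
    (ht : Codebook.lookup_type mem c = 2) (hp : Codebook.entries mem c * Codebook.dimensions mem c ≤ 0x1FFFFFFF)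
    (hblk : Blk ⟨Codebook.multiplicands mem c, 4 * ((Codebook.entries mem c).toNat * (Codebook.dimensions mem c).toNat)⟩) :
    Codebook.K6 Blk mem c := by
  apply Codebook.K6.of_type_two h2 h1 ht hp hblk
  have hN := Codebook.N_le_entries h2
  have hle : (Codebook.N mem c).toNat ≤ (Codebook.entries mem c).toNat := by omega
  have := Nat.mul_le_mul_right (Codebook.dimensions mem c).toNat hle
  omega

/-! ### (e) Header and comments -/

/-- HD3 as inequalities, for `omega`. -/
example (mem : Mem) (f : Nat) (h : HeaderOK mem f) : 64 ≤ stb_vorbis.blocksize_1 mem f ∧ stb_vorbis.blocksize_1 mem f ≤ 8192 := by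
  have := h.HD3.range
  omega

/-- **The check site of `CommentOK` in three lines**: vorbis_deinit's unguarded `__asan_load8_noabort(&p->comment_list[i])`,
`i < comment_list_length` (CM2 = H1). -/
example (Blk : Block → Prop) (Live : Nat → Prop) (mem : Mem) (f i : Nat) (hc : Covers Live mem) (hL : BlkLive Blk Live)
    (h : CommentsOK Blk mem f) (hi : (i : Int) < stb_vorbis.comment_list_length mem f) :
    AccessibleSmall mem (mem.u64 (f + 40) + i * 8) 8 := by
  have s := h.CM2.site_slot hL i hi (a := mem.u64 (f + 40) + i * 8) (by simp only [vacc, voff]; omega)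
  exact s.acc hc

/-- The store `f->vendor[len] = '\0'` (CM1 in its non-NULL form). -/
example (Blk : Block → Prop) (Live : Nat → Prop) (mem : Mem) (f len : Nat) (hc : Covers Live mem) (hL : BlkLive Blk Live)
    (hB : Blk ⟨stb_vorbis.vendor mem f, len + 1⟩) : AccessibleSmall mem (mem.u64 (f + 24) + len) 1 := by
  have s := site_string hL hB len (Nat.le_refl _) (a := mem.u64 (f + 24) + len) (by simp only [vacc, voff])
  exact s.acc hc

/-- A field of `*f` itself (`f->codebook_count`), from OB1. -/
example (Blk : Block → Prop) (Live : Nat → Prop) (mem : Mem) (f : Nat) (hc : Covers Live mem) (hL : BlkLive Blk Live)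
    (hob : OB1 Blk f) : AccessibleSmall mem (f + 160) 4 := by
  have s := hob.site hL Off.stb_vorbis.codebook_count 4 (by simp only [voff]; omega) (by omega)
    (a := f + 160) (by simp only [voff])
  exact s.acc hc

/-! ### No axiom beyond Lean's three -/

#print axioms CodebookOK.transfer
#print axioms CodebookOK.reblk
#print axioms CodebookOK.stable
#print axioms CodebookOK.decode_sparse
#print axioms CodebookOK.site_multiplicands
#print axioms addr_add_word_mul4
#print axioms BooksOK.transfer
#print axioms CommentOK.transfer
#print axioms CommentsOK.good
#print axioms CB0.good
#print axioms HeaderGroup.good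
#print axioms Codebook.Fresh.of_zeroFill
#print axioms countBelow_lt_of

end Vorbis.CodebookTest
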